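-- pv_equiv track=rewrite | github.com/pypi-data/pypi-mirror-97 | packages/libsa4py/libsa4py-0.1.0-py3-none-any.whl/libsa4py/cst_visitor.py | __find_fn_args_use
-- ===== SOURCE A (Python) =====
-- def __find_fn_args_use(fn_args: list, fn_may_args_use: list) -> dict:
--
--     fn_args_use = {}
--     for arg in fn_args:
--         arg_use = []
--         for may_use in fn_may_args_use:
--             if arg in may_use and len(may_use) > 1:
--                 arg_use.append(may_use)
--         fn_args_use[arg] = arg_use
--
--     return fn_args_use
-- ===== SOURCE B (Python) =====
-- def __find_fn_args_use(fn_args: list, fn_may_args_use: list) -> dict: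
--     # Inverted index: one pass over fn_may_args_use, appending each qualifying
--     # collection to the bucket of every distinct argument it contains.
--     args = set(fn_args)
--     index = {}
--     for may_use in fn_may_args_use:
--         if len(may_use) > 1:
--             for e in dict.fromkeys(may_use):
--                 if e in args:
--                     index.setdefault(e, []).append(may_use)
--     return {arg: index.get(arg, []) for arg in fn_args}
-- ===== Notes on version B (the rewrite author's own statement) =====
-- stated objective: faster
-- what changed: Replaces the nested args-by-collections membership scans with a single pass over fn_may_args_use that builds an inverted index from element to the collections containing it, then reads each argument's bucket off the index.
import Mathlib
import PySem

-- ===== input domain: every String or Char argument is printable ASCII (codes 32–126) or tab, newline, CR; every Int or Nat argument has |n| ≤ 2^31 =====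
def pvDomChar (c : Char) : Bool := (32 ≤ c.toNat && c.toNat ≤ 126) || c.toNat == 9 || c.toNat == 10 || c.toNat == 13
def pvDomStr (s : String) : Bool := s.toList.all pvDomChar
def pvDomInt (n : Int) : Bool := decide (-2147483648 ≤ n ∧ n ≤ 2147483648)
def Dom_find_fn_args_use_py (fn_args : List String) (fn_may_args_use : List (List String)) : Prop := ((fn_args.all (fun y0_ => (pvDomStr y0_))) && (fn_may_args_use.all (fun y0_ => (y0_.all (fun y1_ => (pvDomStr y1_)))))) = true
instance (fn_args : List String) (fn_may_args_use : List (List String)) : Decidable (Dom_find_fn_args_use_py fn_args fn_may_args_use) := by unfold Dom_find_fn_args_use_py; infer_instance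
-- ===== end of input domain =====

-- B replaces A's nested membership scans by a single-pass inverted index (asymptotically faster).

-- ===== PORT A =====
def find_fn_args_use_py (fn_args : List String) (fn_may_args_use : List (List String)) : List (String × List (List String)) :=
  (fn_args.foldl (fun d arg =>
    d.insert arg (fn_may_args_use.foldl (fun arg_use may_use =>
      if arg ∈ may_use ∧ 1 < may_use.length then arg_use ++ [may_use] else arg_use) []))
    PySem.Dict.empty).items

-- ===== PORT B =====
def find_fn_args_use_py_alt (fn_args : List String) (fn_may_args_use : List (List String)) : List (String × List (List String)) :=
  let args : PySem.Set String := PySem.Set.ofList fn_args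
  let index : PySem.Dict String (List (List String)) :=
    fn_may_args_use.foldl (fun d may_use =>
      if 1 < may_use.length then
        (PySem.List.dedup may_use).foldl (fun d e =>
          if e ∈ args then d.insert e (d.getD e [] ++ [may_use]) else d) d
      else d) PySem.Dict.empty
  (fn_args.foldl (fun d arg => d.insert arg (index.getD arg [])) PySem.Dict.empty).items

-- ===== PRECONDITION & SPEC =====
def Spec_find_fn_args_use_py (fn_args : List String) (fn_may_args_use : List (List String)) (out : List (String × List (List String))) : Prop := out = find_fn_args_use_py_alt fn_args fn_may_args_use
instance (fn_args : List String) (fn_may_args_use : List (List String)) (out : List (String × List (List String))) : Decidable (Spec_find_fn_args_use_py fn_args fn_may_args_use out) := by unfold Spec_find_fn_args_use_py; infer_instance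

-- ===== CLAIM (what is proved, stated in full; the proofs are below) =====
def Claim_equal_find_fn_args_use_py : Prop := ∀ (fn_args : List String) (fn_may_args_use : List (List String)), Dom_find_fn_args_use_py fn_args fn_may_args_use → Spec_find_fn_args_use_py fn_args fn_may_args_use (find_fn_args_use_py fn_args fn_may_args_use)

-- ===== LEMMAS AND PROOFS =====

-- A's inner loop is a filter.
theorem pvA_inner_eq_filter (arg : String) (mus : List (List String)) :
    mus.foldl (fun arg_use may_use =>
      if arg ∈ may_use ∧ 1 < may_use.length then arg_use ++ [may_use] else arg_use) []
    = mus.filter (fun may_use => decide (arg ∈ may_use ∧ 1 < may_use.length)) := by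
  have h := PySem.List.foldl_append_if
    (p := fun may_use : List String => decide (arg ∈ may_use ∧ 1 < may_use.length))
    (f := id) mus []
  simpa using h

-- B's per-collection inner fold: lookup afterwards.
theorem pvB_inner (args : PySem.Set String) (mu : List String)
    (d : PySem.Dict String (List (List String))) (k : String) (hk : k ∈ args)
    (es : List String) (hnd : es.Nodup) :
    ((es.foldl (fun d e =>
        if e ∈ args then d.insert e (d.getD e [] ++ [mu]) else d) d).getD k [])
    = if k ∈ es then d.getD k [] ++ [mu] else d.getD k [] := by
  induction es generalizing d with
  | nil => simp
  | cons e rest ih =>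
    simp only [List.foldl_cons]
    rcases List.nodup_cons.mp hnd with ⟨he, hrest⟩
    by_cases hke : k = e
    · subst hke
      rw [if_pos hk, ih _ hrest, if_neg he, if_pos (by simp)]
      rw [PySem.Dict.getD_insert_self]
    · by_cases hea : e ∈ args
      · rw [if_pos hea, ih _ hrest, PySem.Dict.getD_insert_of_ne d _ _ hke]
        simp [hke]
      · rw [if_neg hea, ih _ hrest]
        simp [hke]

theorem pvB_index (args : PySem.Set String) (mus : List (List String))
    (d : PySem.Dict String (List (List String))) (k : String) (hk : k ∈ args) :
    ((mus.foldl (fun d may_use =>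
        if 1 < may_use.length then
          (PySem.List.dedup may_use).foldl (fun d e =>
            if e ∈ args then d.insert e (d.getD e [] ++ [may_use]) else d) d
        else d) d).getD k [])
    = d.getD k [] ++ mus.filter (fun may_use => decide (k ∈ may_use ∧ 1 < may_use.length)) := by
  induction mus generalizing d with
  | nil => simp
  | cons mu rest ih =>
    simp only [List.foldl_cons, List.filter_cons]
    by_cases hlen : 1 < mu.length
    · rw [if_pos hlen, ih]
      rw [pvB_inner args mu d k hk (PySem.List.dedup mu) (PySem.List.nodup_dedup mu)]
      by_cases hkm : k ∈ mu
      · simp [hkm, hlen]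
      · simp [hkm, hlen]
    · rw [if_neg hlen, ih]
      simp [hlen]

theorem pvFold_congr (l : List String) (v w : String → List (List String))
    (d : PySem.Dict String (List (List String))) (h : ∀ a ∈ l, v a = w a) :
    l.foldl (fun d arg => d.insert arg (v arg)) d = l.foldl (fun d arg => d.insert arg (w arg)) d := by
  induction l generalizing d with
  | nil => rfl
  | cons x xs ih =>
    simp only [List.foldl_cons]
    rw [h x (by simp)]
    exact ih _ (fun a ha => h a (by simp [ha]))

-- ===== VERDICT (by name: the statement is the Claim_ definition above) =====
theorem find_fn_args_use_py_spec : Claim_equal_find_fn_args_use_py := by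
  intro fn_args fn_may_args_use _
  unfold Spec_find_fn_args_use_py find_fn_args_use_py find_fn_args_use_py_alt
  simp only []
  congr 1
  apply pvFold_congr
  intro a ha
  rw [pvA_inner_eq_filter]
  rw [pvB_index (PySem.Set.ofList fn_args) fn_may_args_use PySem.Dict.empty a (by simpa [PySem.Set.mem_ofList] using ha)]
  rfl
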